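-- pv_equiv track=rewrite | github.com/thiagogmta/k8sgascheduler | docs/ga/taxa_rel_10/02_media_demanda.py | taxa_relacionamento
-- ===== SOURCE A (Python) =====
-- def taxa_relacionamento(alocacao, matriz_nos, matriz_pods, matriz_relacionamentos):
--     pesos_comunicacao = [0] * len(matriz_nos)
--     for i, node in enumerate(alocacao):
--             for j in range(i + 1, len(alocacao)):
--                 if alocacao[j] == node:
--                     pod1 = i
--                     pod2 = j
--                     peso = matriz_relacionamentos[pod1][pod2]
--                     pesos_comunicacao[node] += peso
--     soma_pesos = sum(pesos_comunicacao)
--     return soma_pesos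
-- ===== SOURCE B (Python) =====
-- def taxa_relacionamento(alocacao, matriz_nos, matriz_pods, matriz_relacionamentos):
--     grupos = {}
--     for p, node in enumerate(alocacao):
--         grupos.setdefault(node, []).append(p)
--     total = 0
--     for pods in grupos.values():
--         total += _soma_pares(pods, matriz_relacionamentos)
--     return total
--
--
-- def _soma_pares(pods, matriz_relacionamentos):
--     # sum of relationship weights over all ordered index pairs inside one bucket
--     total = 0
--     while pods:
--         p1 = pods[0]
--         pods = pods[1:]
--         for p2 in pods:
--             total += matriz_relacionamentos[p1][p2]
--     return total
-- ===== Notes on version B (the rewrite author's own statement) =====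
-- stated objective: faster
-- what changed: Replaces the O(n^2) all-pairs equality scan and the per-node weight array by a single group-by-node dict of pod indices followed by intra-bucket pair summation, returning the running total directly.
import Mathlib
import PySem

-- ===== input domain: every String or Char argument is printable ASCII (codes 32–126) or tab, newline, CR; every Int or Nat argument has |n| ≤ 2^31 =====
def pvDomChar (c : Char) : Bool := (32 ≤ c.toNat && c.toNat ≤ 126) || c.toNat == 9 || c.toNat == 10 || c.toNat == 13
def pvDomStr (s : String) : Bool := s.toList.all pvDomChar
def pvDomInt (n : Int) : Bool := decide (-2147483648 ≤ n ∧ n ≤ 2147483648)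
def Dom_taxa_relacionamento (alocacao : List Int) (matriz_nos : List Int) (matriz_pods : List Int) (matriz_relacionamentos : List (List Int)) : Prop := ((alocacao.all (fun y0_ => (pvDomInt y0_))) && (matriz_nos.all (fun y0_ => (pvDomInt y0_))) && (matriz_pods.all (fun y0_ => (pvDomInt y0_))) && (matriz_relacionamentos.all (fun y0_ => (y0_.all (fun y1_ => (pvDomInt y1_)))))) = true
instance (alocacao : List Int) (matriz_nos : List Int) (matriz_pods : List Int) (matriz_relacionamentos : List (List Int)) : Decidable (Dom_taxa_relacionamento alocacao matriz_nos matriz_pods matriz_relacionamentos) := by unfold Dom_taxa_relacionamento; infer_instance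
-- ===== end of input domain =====

-- B replaces A's O(n^2) all-pairs equality scan with per-node weight array by a group-by-node
-- dict of pod indices followed by intra-bucket pair summation; return value only is compared.

-- shared transliteration of the raising access matriz_relacionamentos[p1][p2]
-- (exact whenever 0 ≤ p1 < len and 0 ≤ p2 < len row — guaranteed by Pre_ for every access made)
def pvW (reln : List (List Int)) (p1 p2 : Int) : Int :=
  PySem.List.pyGetD (PySem.List.pyGetD reln p1 []) p2 0

-- ===== PORT A =====
def taxa_relacionamento (alocacao : List Int) (matriz_nos : List Int) (matriz_pods : List Int) (matriz_relacionamentos : List (List Int)) : Int :=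
  let pesos0 : List Int := List.replicate matriz_nos.length 0
  let pesos := (PySem.List.enumerate alocacao).foldl (fun pesos q =>
      (PySem.List.pyRange (q.1 + 1) (alocacao.length : Int) 1).foldl (fun pesos j =>
        if PySem.List.pyGetD alocacao j 0 = q.2 then
          PySem.List.pySetD pesos q.2
            (PySem.List.pyGetD pesos q.2 0 + pvW matriz_relacionamentos q.1 j)
        else pesos) pesos) pesos0
  pesos.sum

-- ===== PORT B =====
-- _soma_pares: while pods: p1 = pods[0]; pods = pods[1:]; for p2 in pods: total += reln[p1][p2]
def somaPares (reln : List (List Int)) : Int → List Int → Int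
  | total, [] => total
  | total, p1 :: pods =>
      somaPares reln (pods.foldl (fun t p2 => t + pvW reln p1 p2) total) pods

def taxa_relacionamento_alt (alocacao : List Int) (matriz_nos : List Int) (matriz_pods : List Int) (matriz_relacionamentos : List (List Int)) : Int :=
  let grupos := (PySem.List.enumerate alocacao).foldl
      (fun d q => d.modify q.2 [] (fun l => l ++ [q.1])) PySem.Dict.empty
  grupos.values.foldl (fun total pods => total + somaPares matriz_relacionamentos 0 pods) 0

-- ===== PRECONDITION & SPEC =====
-- Pre_ excludes exactly the inputs where A raises: some co-located pair (i, j) whose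
-- matriz_relacionamentos[i][j] access fails (IndexError) or whose node value is not a valid
-- (possibly negative) Python index into the per-node weight array of length len(matriz_nos).
def Pre_taxa_relacionamento (alocacao : List Int) (matriz_nos : List Int) (matriz_pods : List Int) (matriz_relacionamentos : List (List Int)) : Prop :=
  ∀ i, i < alocacao.length → ∀ j, j < alocacao.length → i < j →
    alocacao.getD i 0 = alocacao.getD j 0 →
    (i < matriz_relacionamentos.length ∧ j < (matriz_relacionamentos.getD i []).length ∧
     PySem.Raise.InRange matriz_nos.length (alocacao.getD i 0))
instance (alocacao : List Int) (matriz_nos : List Int) (matriz_pods : List Int) (matriz_relacionamentos : List (List Int)) : Decidable (Pre_taxa_relacionamento alocacao matriz_nos matriz_pods matriz_relacionamentos) := by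
  unfold Pre_taxa_relacionamento; apply Nat.decidableBallLT

def pvWitness_taxa_relacionamento : List Int × List Int × List Int × List (List Int) :=
  ([0, 0, 1], [5, 6], [], [[0, 7, 0], [0, 0, 0], [0, 0, 0]])

def Spec_taxa_relacionamento (alocacao : List Int) (matriz_nos : List Int) (matriz_pods : List Int) (matriz_relacionamentos : List (List Int)) (out : Int) : Prop := out = taxa_relacionamento_alt alocacao matriz_nos matriz_pods matriz_relacionamentos
instance (alocacao : List Int) (matriz_nos : List Int) (matriz_pods : List Int) (matriz_relacionamentos : List (List Int)) (out : Int) : Decidable (Spec_taxa_relacionamento alocacao matriz_nos matriz_pods matriz_relacionamentos out) := by unfold Spec_taxa_relacionamento; infer_instance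

-- ===== CLAIM (what is proved, stated in full; the proofs are below) =====
def Claim_equal_taxa_relacionamento : Prop := ∀ (alocacao : List Int) (matriz_nos : List Int) (matriz_pods : List Int) (matriz_relacionamentos : List (List Int)), Dom_taxa_relacionamento alocacao matriz_nos matriz_pods matriz_relacionamentos → Pre_taxa_relacionamento alocacao matriz_nos matriz_pods matriz_relacionamentos → Spec_taxa_relacionamento alocacao matriz_nos matriz_pods matriz_relacionamentos (taxa_relacionamento alocacao matriz_nos matriz_pods matriz_relacionamentos)

-- ===== LEMMAS AND PROOFS =====
lemma pv_sum_set (xs : List Int) (k : Nat) (h : k < xs.length) (v : Int) :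
    (xs.set k v).sum = xs.sum - xs[k] + v := by
  induction xs generalizing k with
  | nil => simp at h
  | cons x t ih =>
    cases k with
    | zero => simp [List.sum_cons]; ring
    | succ m => simp only [List.set_cons_succ, List.sum_cons, ih m (by simpa using h)]; simp; ring

lemma pv_idx_of_inRange (n : Nat) (v : Int) (h : PySem.Raise.InRange n v) :
    ∃ k, PySem.List.pyIdx? n v = some k ∧ k < n := by
  obtain ⟨h1, h2⟩ := h
  unfold PySem.List.pyIdx?
  by_cases h3 : 0 ≤ v
  · rw [if_pos h3, if_pos (by omega : v < (n:Int))]; exact ⟨v.toNat, rfl, by omega⟩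
  · rw [if_neg h3, if_pos (by omega : -(n:Int) ≤ v)]; exact ⟨n - (-v).toNat, rfl, by omega⟩

lemma pv_setD_sum (pesos : List Int) (v peso : Int)
    (h : PySem.Raise.InRange pesos.length v) :
    (PySem.List.pySetD pesos v (PySem.List.pyGetD pesos v 0 + peso)).sum = pesos.sum + peso ∧
    (PySem.List.pySetD pesos v (PySem.List.pyGetD pesos v 0 + peso)).length = pesos.length := by
  obtain ⟨k, hk, hkn⟩ := pv_idx_of_inRange pesos.length v h
  have hget : PySem.List.pyGetD pesos v 0 = pesos[k] := by
    simp [PySem.List.pyGetD, PySem.List.pyGet?, hk, List.getElem?_eq_getElem hkn]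
  have hset : PySem.List.pySetD pesos v (PySem.List.pyGetD pesos v 0 + peso) = pesos.set k (pesos[k] + peso) := by
    simp [PySem.List.pySetD, PySem.List.pySet?, hk, hget]
  rw [hset]
  refine ⟨?_, by simp⟩
  rw [pv_sum_set pesos k hkn]
  ring

lemma pv_inner_fold (reln : List (List Int)) (aloc : List Int) (x i : Int) (L : Nat)
    (js : List Int) (pesos : List Int) (hl : pesos.length = L)
    (hr : (∃ j ∈ js, PySem.List.pyGetD aloc j 0 = x) → PySem.Raise.InRange L x) :
    (js.foldl (fun pesos j =>
        if PySem.List.pyGetD aloc j 0 = x then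
          PySem.List.pySetD pesos x (PySem.List.pyGetD pesos x 0 + pvW reln i j)
        else pesos) pesos).sum
      = pesos.sum + (js.map (fun j => if PySem.List.pyGetD aloc j 0 = x then pvW reln i j else 0)).sum ∧
    (js.foldl (fun pesos j =>
        if PySem.List.pyGetD aloc j 0 = x then
          PySem.List.pySetD pesos x (PySem.List.pyGetD pesos x 0 + pvW reln i j)
        else pesos) pesos).length = L := by
  induction js generalizing pesos with
  | nil => exact ⟨by simp, by simpa using hl⟩
  | cons j0 js ih =>
    by_cases hc : PySem.List.pyGetD aloc j0 0 = x
    · have hin : PySem.Raise.InRange pesos.length x := by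
        rw [hl]; exact hr ⟨j0, List.mem_cons_self, hc⟩
      obtain ⟨hs, hlen⟩ := pv_setD_sum pesos x (pvW reln i j0) hin
      have := ih (PySem.List.pySetD pesos x (PySem.List.pyGetD pesos x 0 + pvW reln i j0))
        (by rw [hlen, hl]) (fun ⟨j, hj, hjx⟩ => hr ⟨j, List.mem_cons_of_mem _ hj, hjx⟩)
      simp only [List.foldl_cons, if_pos hc, List.map_cons, List.sum_cons]
      refine ⟨?_, this.2⟩
      rw [this.1, hs]; ring
    · simp only [List.foldl_cons, if_neg hc, List.map_cons, List.sum_cons]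
      have := ih pesos hl (fun ⟨j, hj, hjx⟩ => hr ⟨j, List.mem_cons_of_mem _ hj, hjx⟩)
      refine ⟨?_, this.2⟩
      rw [this.1]; ring

def pvContrib (reln : List (List Int)) (aloc : List Int) (q : Int × Int) : Int :=
  ((PySem.List.pyRange (q.1 + 1) (aloc.length : Int) 1).map
    (fun j => if PySem.List.pyGetD aloc j 0 = q.2 then pvW reln q.1 j else 0)).sum

lemma pv_outer_fold (reln : List (List Int)) (aloc : List Int) (L : Nat)
    (e : List (Int × Int)) (pesos : List Int) (hl : pesos.length = L)
    (hr : ∀ q ∈ e, (∃ j ∈ PySem.List.pyRange (q.1 + 1) (aloc.length : Int) 1,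
            PySem.List.pyGetD aloc j 0 = q.2) → PySem.Raise.InRange L q.2) :
    (e.foldl (fun pesos q =>
      (PySem.List.pyRange (q.1 + 1) (aloc.length : Int) 1).foldl (fun pesos j =>
        if PySem.List.pyGetD aloc j 0 = q.2 then
          PySem.List.pySetD pesos q.2 (PySem.List.pyGetD pesos q.2 0 + pvW reln q.1 j)
        else pesos) pesos) pesos).sum
      = pesos.sum + (e.map (pvContrib reln aloc)).sum := by
  induction e generalizing pesos with
  | nil => simp
  | cons q e ih =>
    obtain ⟨hs, hlen⟩ := pv_inner_fold reln aloc q.2 q.1 L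
      (PySem.List.pyRange (q.1 + 1) (aloc.length : Int) 1) pesos hl
      (hr q List.mem_cons_self)
    simp only [List.foldl_cons, List.map_cons, List.sum_cons]
    rw [ih _ hlen (fun r hrm => hr r (List.mem_cons_of_mem _ hrm)), hs, pvContrib]
    ring

lemma pv_range_enum {γ : Type} (aloc : List Int) (k : Nat) (hk : k ≤ aloc.length)
    (g : Int → Int → γ) :
    (PySem.List.pyRange (k : Int) (aloc.length : Int) 1).map (fun j => g j (PySem.List.pyGetD aloc j 0))
      = (PySem.List.enumerate (aloc.drop k) k).map (fun r => g r.1 r.2) := by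
  induction hd : aloc.length - k generalizing k with
  | zero =>
    have h1 : aloc.drop k = [] := by
      apply List.drop_eq_nil_of_le; omega
    rw [h1, PySem.List.pyRange_one_eq_nil (by omega)]
    simp [PySem.List.enumerate]
  | succ m ih =>
    have hk' : k < aloc.length := by omega
    rw [PySem.List.pyRange_one_cons (by exact_mod_cast hk')]
    rw [List.drop_eq_getElem_cons hk']
    rw [PySem.List.enumerate_cons]
    simp only [List.map_cons]
    have hg : PySem.List.pyGetD aloc (k : Int) 0 = aloc[k] := by
      simp [PySem.List.pyGetD, PySem.List.pyGet?_natCast, List.getElem?_eq_getElem hk']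
    rw [hg]
    have := ih (k + 1) (by omega) (by omega)
    rw [show ((k : Int) + 1) = ((k + 1 : Nat) : Int) by push_cast; ring, this]

def pvF (reln : List (List Int)) : List (Int × Int) → Int
  | [] => 0
  | q :: rest =>
      (rest.map (fun r => if r.2 = q.2 then pvW reln q.1 r.1 else 0)).sum + pvF reln rest

lemma pv_F_eq_sum_contrib (reln : List (List Int)) (aloc : List Int) (k : Nat) (hk : k ≤ aloc.length) :
    pvF reln (PySem.List.enumerate (aloc.drop k) k)
      = ((PySem.List.enumerate (aloc.drop k) k).map (pvContrib reln aloc)).sum := by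
  induction hd : aloc.length - k generalizing k with
  | zero =>
    have h1 : aloc.drop k = [] := by apply List.drop_eq_nil_of_le; omega
    simp [h1, pvF]
  | succ m ih =>
    have hk' : k < aloc.length := by omega
    rw [List.drop_eq_getElem_cons hk', PySem.List.enumerate_cons]
    rw [pvF, List.map_cons, List.sum_cons]
    have hhead : ((PySem.List.enumerate (aloc.drop (k+1)) ((k:Int)+1)).map
        (fun r => if r.2 = aloc[k] then pvW reln (k:Int) r.1 else 0)).sum
        = pvContrib reln aloc ((k:Int), aloc[k]) := by
      rw [pvContrib]
      have := pv_range_enum aloc (k+1) (by omega) (fun j y => if y = aloc[k] then pvW reln (k:Int) j else 0)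
      simp only at this ⊢
      rw [show ((k : Int) + 1) = ((k + 1 : Nat) : Int) by push_cast; ring, this]
    rw [show ((k : Int) + 1) = ((k + 1 : Nat) : Int) by push_cast; ring] at hhead ⊢
    rw [hhead, ih (k+1) (by omega) (by omega)]

def pvPairs (reln : List (List Int)) : List Int → Int
  | [] => 0
  | p1 :: rest => (rest.map (fun p2 => pvW reln p1 p2)).sum + pvPairs reln rest

def pvBucket (l : List (Int × Int)) (v : Int) : List Int :=
  (l.filter (fun r => r.2 == v)).map (·.1)

lemma pv_somaPares (reln : List (List Int)) (l : List Int) (acc : Int) :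
    somaPares reln acc l = acc + pvPairs reln l := by
  induction l generalizing acc with
  | nil => simp [somaPares, pvPairs]
  | cons p1 rest ih =>
    rw [somaPares, pvPairs, ih, PySem.List.foldl_add]
    ring

lemma pv_sum_map_one_off (vs : List Int) (g g' : Int → Int) (c δ : Int)
    (hn : vs.Nodup) (hc : c ∈ vs) (hne : ∀ v ∈ vs, v ≠ c → g v = g' v)
    (hgc : g c = δ + g' c) :
    (vs.map g).sum = δ + (vs.map g').sum := by
  induction vs with
  | nil => simp at hc
  | cons v vs ih =>
    rcases List.mem_cons.mp hc with h | h
    · subst h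
      simp only [List.map_cons, List.sum_cons, hgc]
      have : vs.map g = vs.map g' := by
        apply List.map_congr_left
        intro w hw
        exact hne w (List.mem_cons_of_mem _ hw) (fun hwc => (List.nodup_cons.mp hn).1 (hwc ▸ hw))
      rw [this]; ring
    · have hvne : v ≠ c := fun hvc => (List.nodup_cons.mp hn).1 (hvc ▸ h)
      simp only [List.map_cons, List.sum_cons,
        hne v List.mem_cons_self hvne,
        ih (List.nodup_cons.mp hn).2 h (fun w hw => hne w (List.mem_cons_of_mem _ hw))]
      ring

lemma pv_bucket_sum (reln : List (List Int)) (p : Int) (l : List (Int × Int)) (v : Int) :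
    ((pvBucket l v).map (fun p2 => pvW reln p p2)).sum
      = (l.map (fun r => if r.2 = v then pvW reln p r.1 else 0)).sum := by
  induction l with
  | nil => simp [pvBucket]
  | cons q l ih =>
    by_cases h : q.2 = v
    · simp only [pvBucket, List.filter_cons, h] at ih ⊢
      simp [h, ← ih]
    · simp only [pvBucket, List.filter_cons] at ih ⊢
      simp [h, ← ih]

lemma pv_bucket_cons (q : Int × Int) (l : List (Int × Int)) (v : Int) :
    pvBucket (q :: l) v = if q.2 = v then q.1 :: pvBucket l v else pvBucket l v := by
  by_cases h : q.2 = v <;> simp [pvBucket, h]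

lemma pv_partition (reln : List (List Int)) (l : List (Int × Int)) (vs : List Int)
    (hn : vs.Nodup) (hcov : ∀ q ∈ l, q.2 ∈ vs) :
    (vs.map (fun v => pvPairs reln (pvBucket l v))).sum = pvF reln l := by
  induction l with
  | nil =>
    have : ∀ v ∈ vs, pvPairs reln (pvBucket [] v) = 0 := by intro v _; simp [pvBucket, pvPairs]
    rw [List.map_congr_left (fun v hv => this v hv)]
    simp [pvF]
  | cons q l ih =>
    rw [pvF, ← ih (fun r hr => hcov r (List.mem_cons_of_mem _ hr))]
    apply pv_sum_map_one_off vs _ _ q.2 _ hn (hcov q List.mem_cons_self)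
    · intro v hv hne
      rw [pv_bucket_cons, if_neg (fun h => hne h.symm)]
    · rw [pv_bucket_cons, if_pos rfl, pvPairs, pv_bucket_sum]

lemma pv_fold_swap (l : List (Int × Int)) (d : PySem.Dict Int (List Int)) :
    l.foldl (fun d q => d.modify q.2 [] (fun t => t ++ [q.1])) d
      = (l.map (fun q => (q.2, q.1))).foldl (fun d p => d.modify p.1 [] (fun t => t ++ [p.2])) d := by
  induction l generalizing d <;> simp [*]

-- dict built by the grouping loop: getD is the ascending bucket, keys are first-occurrence values

lemma pv_grupos_getD (aloc : List Int) (v : Int) :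
    ((PySem.List.enumerate aloc).foldl
      (fun d q => d.modify q.2 [] (fun l => l ++ [q.1])) PySem.Dict.empty).getD v []
      = pvBucket (PySem.List.enumerate aloc) v := by
  rw [pv_fold_swap, PySem.Dict.getD_foldl_modify_append]
  simp [pvBucket, List.filter_map, Function.comp_def]

theorem pv_main (alocacao : List Int) (matriz_nos : List Int) (matriz_pods : List Int)
    (matriz_relacionamentos : List (List Int))
    (hpre : Pre_taxa_relacionamento alocacao matriz_nos matriz_pods matriz_relacionamentos) :
    taxa_relacionamento alocacao matriz_nos matriz_pods matriz_relacionamentos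
      = taxa_relacionamento_alt alocacao matriz_nos matriz_pods matriz_relacionamentos := by
  unfold taxa_relacionamento taxa_relacionamento_alt
  simp only []
  set reln := matriz_relacionamentos with hreln
  -- A side
  have hrA : ∀ q ∈ PySem.List.enumerate alocacao,
      (∃ j ∈ PySem.List.pyRange (q.1 + 1) (alocacao.length : Int) 1,
        PySem.List.pyGetD alocacao j 0 = q.2) → PySem.Raise.InRange matriz_nos.length q.2 := by
    intro q hq ⟨j, hj, hjx⟩
    obtain ⟨k, hk, rfl⟩ := (PySem.List.mem_enumerate_iff _ _ _).mp hq
    obtain ⟨hj1, hj2⟩ := PySem.List.mem_pyRange_one.mp hj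
    have hj0 : 0 ≤ j := by omega
    have hjlt : j.toNat < alocacao.length := by omega
    have hgd : PySem.List.pyGetD alocacao j 0 = alocacao.getD j.toNat 0 :=
      PySem.List.pyGetD_of_nonneg _ _ hj0
    have hklt : k < j.toNat := by omega
    have h2 := (hpre k (by omega) j.toNat hjlt hklt (by
      rw [List.getD_eq_getElem _ _ hk, ← hgd, hjx])).2.2
    rw [List.getD_eq_getElem _ _ hk] at h2
    simpa using h2
  have hA := pv_outer_fold reln alocacao matriz_nos.length (PySem.List.enumerate alocacao)
    (List.replicate matriz_nos.length 0) (by simp) hrA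
  rw [hA]
  have hsum0 : (List.replicate matriz_nos.length (0:Int)).sum = 0 := by simp
  rw [hsum0]
  have hFA : ((PySem.List.enumerate alocacao).map (pvContrib reln alocacao)).sum
      = pvF reln (PySem.List.enumerate alocacao) := by
    have := pv_F_eq_sum_contrib reln alocacao 0 (by omega)
    simpa using this.symm
  rw [zero_add, hFA]
  -- B side
  set grupos := (PySem.List.enumerate alocacao).foldl
      (fun d q => d.modify q.2 [] (fun l => l ++ [q.1])) PySem.Dict.empty with hgr
  have hkeys : grupos.keys = PySem.Set.ofList alocacao := by
    rw [hgr, PySem.Dict.keys_foldl_modify_key]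
    rw [PySem.Dict.keys_empty, PySem.Set.update_nil_left, PySem.List.map_snd_enumerate]
  have hnd : grupos.keys.Nodup := by
    rw [hkeys]; exact PySem.Set.nodup_ofList _
  have hvals : grupos.values = grupos.keys.map (fun k => grupos.getD k []) :=
    PySem.Dict.values_eq_map_keys grupos hnd []
  rw [hvals, List.foldl_map, PySem.List.foldl_add]
  rw [zero_add]
  have hmap : grupos.keys.map (fun v => somaPares reln 0 (grupos.getD v []))
      = grupos.keys.map (fun v => pvPairs reln (pvBucket (PySem.List.enumerate alocacao) v)) := by
    apply List.map_congr_left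
    intro v _
    rw [hgr, pv_grupos_getD, pv_somaPares, zero_add]
  rw [hmap, hkeys]
  rw [pv_partition reln _ _ (PySem.Set.nodup_ofList _) ?_]
  intro q hq
  obtain ⟨k, hk, rfl⟩ := (PySem.List.mem_enumerate_iff _ _ _).mp hq
  exact (PySem.Set.mem_ofList _ _).mpr (List.getElem_mem hk)

-- ===== VERDICT (by name: the statement is the Claim_ definition above) =====
theorem taxa_relacionamento_spec : Claim_equal_taxa_relacionamento := by
  intro alocacao matriz_nos matriz_pods matriz_relacionamentos _ hpre
  unfold Spec_taxa_relacionamento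
  exact pv_main alocacao matriz_nos matriz_pods matriz_relacionamentos hpre
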